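-- pv_equiv track=rewrite | github.com/StarAbhi/StarAbhi | priceCal.py | calculateAmount
-- ===== SOURCE A (Python) =====
-- def calculateAmount(prices):
--     cost=[]
--     for i in range(len(prices)):
--         if i==0:
--             cost.append(prices[0])
--         else:
--             d=prices[0:i]
--             if prices[i]-min(d) > 0:
--                 cost.append(prices[i]-min(d))
--             else:
--                 cost.append(0)
--
--     return sum(cost)
-- ===== SOURCE B (Python) =====
-- def calculateAmount(prices):
--     if not prices:
--         return 0
--     total = prices[0]
--     m = prices[0]
--     for p in prices[1:]:
--         gain = p - m
--         if gain > 0: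
--             total += gain
--         if p < m:
--             m = p
--     return total
-- ===== Notes on version B (the rewrite author's own statement) =====
-- stated objective: faster
-- what changed: Replaces the quadratic re-slicing and re-computation of min(prices[0:i]) at each index with a single pass that maintains the running prefix minimum and accumulates positive gains directly.
import Mathlib
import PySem

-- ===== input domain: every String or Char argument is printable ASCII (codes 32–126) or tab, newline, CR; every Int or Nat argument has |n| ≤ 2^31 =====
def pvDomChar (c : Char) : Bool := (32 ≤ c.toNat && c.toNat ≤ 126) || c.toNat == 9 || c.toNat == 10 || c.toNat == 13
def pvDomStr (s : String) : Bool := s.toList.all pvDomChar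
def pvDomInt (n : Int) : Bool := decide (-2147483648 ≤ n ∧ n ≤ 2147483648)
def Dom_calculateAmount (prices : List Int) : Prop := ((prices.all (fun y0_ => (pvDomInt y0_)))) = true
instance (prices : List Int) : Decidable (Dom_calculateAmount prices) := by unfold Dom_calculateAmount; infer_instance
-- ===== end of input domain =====

-- B replaces A's quadratic per-index re-slicing and min(prices[0:i]) recomputation by a
-- single pass maintaining the running prefix minimum (objective: faster, asymptotic).

-- ===== PORT A =====
-- literal transliteration of A: build the `cost` list over range(len(prices)), then sum it.
-- min(d) is PySem.List.min?; d is nonempty whenever that branch runs (i ≥ 1), so .getD 0 is never taken.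
def calculateAmount (prices : List Int) : Int :=
  let cost := (PySem.List.pyRange 0 (prices.length : Int) 1).foldl (fun acc i =>
    if i == 0 then
      acc ++ [PySem.List.pyGetD prices 0 0]
    else
      let d := PySem.List.slice prices (some 0) (some i)
      let m := (PySem.List.min? d (fun y => y)).getD 0
      let pi := PySem.List.pyGetD prices i 0
      if pi - m > 0 then acc ++ [pi - m] else acc ++ [0]) []
  cost.sum

-- ===== PORT B =====
-- literal transliteration of B: empty check, then one fold over prices[1:] carrying (total, m).
def calculateAmount_alt (prices : List Int) : Int :=
  match prices with
  | [] => 0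
  | p :: rest =>
    (rest.foldl (fun (s : Int × Int) (x : Int) =>
        let gain := x - s.2
        let total := if gain > 0 then s.1 + gain else s.1
        let m := if x < s.2 then x else s.2
        (total, m)) (p, p)).1

-- ===== PRECONDITION & SPEC =====
def Spec_calculateAmount (prices : List Int) (out : Int) : Prop := out = calculateAmount_alt prices
instance (prices : List Int) (out : Int) : Decidable (Spec_calculateAmount prices out) := by unfold Spec_calculateAmount; infer_instance

-- ===== CLAIM (what is proved, stated in full; the proofs are below) =====
def Claim_equal_calculateAmount : Prop := ∀ (prices : List Int), Dom_calculateAmount prices → Spec_calculateAmount prices (calculateAmount prices)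

-- ===== LEMMAS AND PROOFS =====

/-- Reference: sum of positive gains over the running prefix minimum `m`. -/
def pvSpec (m : Int) : List Int → Int
  | [] => 0
  | x :: xs => (if x - m > 0 then x - m else 0) + pvSpec (min m x) xs

lemma pvB_fold (l : List Int) : ∀ (t m : Int),
    (l.foldl (fun (s : Int × Int) (x : Int) =>
        let gain := x - s.2
        let total := if gain > 0 then s.1 + gain else s.1
        let m := if x < s.2 then x else s.2
        (total, m)) (t, m)).1 = t + pvSpec m l := by
  induction l with
  | nil => intro t m; simp [pvSpec]
  | cons x xs ih =>
    intro t m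
    simp only [List.foldl_cons, pvSpec, ih]
    have hmin : (if x < m then x else m) = min m x := by omega
    rw [hmin]
    split_ifs <;> ring

lemma pvA_sum (rest : List Int) : ∀ (p : Int),
    ((List.range rest.length).map (fun k =>
      if rest.getD k 0 - (rest.take k).foldl min p > 0
      then rest.getD k 0 - (rest.take k).foldl min p else 0)).sum = pvSpec p rest := by
  induction rest with
  | nil => intro p; simp [pvSpec]
  | cons x xs ih =>
    intro p
    rw [List.length_cons, List.range_succ_eq_map, List.map_cons, List.map_map, List.sum_cons]
    simp only [Function.comp_def, List.getD_cons_zero, List.take_zero, List.foldl_nil,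
      List.getD_cons_succ, List.take_succ_cons, List.foldl_cons]
    rw [ih (min p x)]
    simp [pvSpec]

theorem pv_main (prices : List Int) : calculateAmount prices = calculateAmount_alt prices := by
  cases prices with
  | nil =>
    simp [calculateAmount, calculateAmount_alt]
  | cons p rest =>
    simp only [calculateAmount, calculateAmount_alt]
    rw [pvB_fold]
    -- rewrite A's loop body into the `acc ++ [g i]` shape
    have hbody : (fun (acc : List Int) (i : Int) =>
        if i == 0 then
          acc ++ [PySem.List.pyGetD (p :: rest) 0 0]
        else
          let d := PySem.List.slice (p :: rest) (some 0) (some i)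
          let m := (PySem.List.min? d (fun y => y)).getD 0
          let pi := PySem.List.pyGetD (p :: rest) i 0
          if pi - m > 0 then acc ++ [pi - m] else acc ++ [0])
      = (fun acc i => acc ++ [
          if i == 0 then PySem.List.pyGetD (p :: rest) 0 0
          else
            let d := PySem.List.slice (p :: rest) (some 0) (some i)
            let m := (PySem.List.min? d (fun y => y)).getD 0
            let pi := PySem.List.pyGetD (p :: rest) i 0
            if pi - m > 0 then pi - m else 0]) := by
      funext acc i
      by_cases h0 : i == 0 <;> simp only [h0, if_true, if_false, Bool.false_eq_true] <;>
        split_ifs <;> rfl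
    simp only [hbody, PySem.List.foldl_append_singleton_eq_map, List.nil_append]
    have hn : (0 : Int) < ((p :: rest).length : Int) := by
      simp
    rw [PySem.List.pyRange_one_cons hn, List.map_cons, List.sum_cons]
    have hg0 : (if (0 : Int) == 0 then PySem.List.pyGetD (p :: rest) 0 0
        else
          let d := PySem.List.slice (p :: rest) (some 0) (some 0)
          let m := (PySem.List.min? d (fun y => y)).getD 0
          let pi := PySem.List.pyGetD (p :: rest) 0 0
          if pi - m > 0 then pi - m else 0) = p := by
      simp [PySem.List.pyGetD, PySem.List.pyIdx?, PySem.List.pyGet?]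
    rw [hg0]
    congr 1
    -- tail: range over Int indices 1..n  →  pvSpec p rest
    have hrange : PySem.List.pyRange (0 + 1) ((p :: rest).length : Int) 1
        = (List.range rest.length).map (fun k : Nat => (1 : Int) + (k : Int)) := by
      rw [PySem.List.pyRange_one]
      have hlen : (((p :: rest).length : Int) - (0 + 1)).toNat = rest.length := by
        simp
      rw [hlen]
      apply List.map_congr_left
      intro a _
      norm_num
    rw [hrange, List.map_map, ← pvA_sum rest p]
    refine congrArg List.sum (List.map_congr_left ?_)
    intro k hk
    simp only [Function.comp]
    have hne : ¬ ((1 + (k : Int)) == 0) := by simp; omega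
    simp only [hne, Bool.false_eq_true, if_false]
    have hslice : PySem.List.slice (p :: rest) (some 0) (some (1 + (k : Int)))
        = p :: rest.take k := by
      have : (1 + (k : Int)) = ((1 + k : Nat) : Int) := by push_cast; ring
      rw [this, PySem.List.slice_zero_start, PySem.List.slice_to_natCast, Nat.add_comm]
      rfl
    rw [hslice]
    have hmin : (PySem.List.min? (p :: rest.take k) (fun y => y)).getD 0
        = (rest.take k).foldl min p := by
      rw [PySem.List.min?_id_cons]; rfl
    have hget : PySem.List.pyGetD (p :: rest) (1 + (k : Int)) 0 = rest.getD k 0 := by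
      have : (1 + (k : Int)) = ((1 + k : Nat) : Int) := by push_cast; ring
      rw [this, PySem.List.pyGetD_natCast, Nat.add_comm]
      simp [List.getD]
    rw [hmin, hget]

-- ===== VERDICT (by name: the statement is the Claim_ definition above) =====
theorem calculateAmount_spec : Claim_equal_calculateAmount := by
  intro prices _
  unfold Spec_calculateAmount
  exact pv_main prices
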